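-- pv_equiv track=rewrite | github.com/DavidS-bot/inmuebles-backend-api | app/services/movements.py | pick_fecha_column
-- ===== SOURCE A (Python) =====
-- from typing import List, Tuple
--
-- def pick_fecha_column(cols: List[str]) -> str | None:
--     low = {c: c.lower() for c in cols}
--     for c,l in low.items():
--         if "fecha" in l and ("val" in l or "valor" in l): return c
--     for c,l in low.items():
--         if "fecha" in l and ("contab" in l or "contable" in l): return c
--     for c,l in low.items():
--         if "fecha" in l: return c
--     return None
-- ===== SOURCE B (Python) =====
-- def pick_fecha_column(cols):
--     best = None  # (priority, column); lower priority wins, earliest kept on ties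
--     for c in cols:
--         l = c.lower()
--         if "fecha" not in l:
--             continue
--         if "val" in l or "valor" in l:
--             p = 1
--         elif "contab" in l or "contable" in l:
--             p = 2
--         else:
--             p = 3
--         if best is None or p < best[0]:
--             best = (p, c)
--     return best[1] if best is not None else None
-- ===== Notes on version B (the rewrite author's own statement) =====
-- stated objective: simpler
-- what changed: Replaces the dict comprehension plus three sequential priority scans with a single pass that assigns each column a numeric priority (1 val, 2 contab, 3 plain fecha) and keeps the earliest column of lowest priority.
import Mathlib
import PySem

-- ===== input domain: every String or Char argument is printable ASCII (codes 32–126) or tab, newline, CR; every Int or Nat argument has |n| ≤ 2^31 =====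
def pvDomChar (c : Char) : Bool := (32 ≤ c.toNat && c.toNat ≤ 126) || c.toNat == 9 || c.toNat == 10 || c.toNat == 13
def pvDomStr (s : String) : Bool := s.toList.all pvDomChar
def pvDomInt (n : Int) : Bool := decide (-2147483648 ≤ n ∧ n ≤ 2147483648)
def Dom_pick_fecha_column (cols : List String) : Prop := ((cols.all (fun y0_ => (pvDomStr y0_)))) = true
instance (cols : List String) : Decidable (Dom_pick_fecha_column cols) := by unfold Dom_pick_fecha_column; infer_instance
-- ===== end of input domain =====

-- B replaces A's dict comprehension plus three sequential priority scans with one pass tracking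
-- the earliest column of lowest numeric priority; objective: simpler.

-- ===== PORT A =====
-- low = {c: c.lower() for c in cols}
-- then three for-loops over low.items(), each returning the first match.
def pick_fecha_column (cols : List String) : Option String :=
  let low : PySem.Dict String String :=
    cols.foldl (fun d c => d.insert c (PySem.Str.lower c)) PySem.Dict.empty
  match low.items.find? (fun cl =>
      PySem.Str.isIn "fecha" cl.2 && (PySem.Str.isIn "val" cl.2 || PySem.Str.isIn "valor" cl.2)) with
  | some cl => some cl.1
  | none =>
    match low.items.find? (fun cl =>
        PySem.Str.isIn "fecha" cl.2 && (PySem.Str.isIn "contab" cl.2 || PySem.Str.isIn "contable" cl.2)) with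
    | some cl => some cl.1
    | none =>
      match low.items.find? (fun cl => PySem.Str.isIn "fecha" cl.2) with
      | some cl => some cl.1
      | none => none

-- ===== PORT B =====
-- priority of a lowered column name: 1 val, 2 contab, 3 plain fecha, none otherwise
def pvPrio (l : String) : Option Nat :=
  if !(PySem.Str.isIn "fecha" l) then none
  else if PySem.Str.isIn "val" l || PySem.Str.isIn "valor" l then some 1
  else if PySem.Str.isIn "contab" l || PySem.Str.isIn "contable" l then some 2
  else some 3

-- one pass: keep the earliest column with the lowest priority
def pvStep (best : Option (Nat × String)) (c : String) : Option (Nat × String) :=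
  match pvPrio (PySem.Str.lower c) with
  | none => best
  | some p =>
    match best with
    | none => some (p, c)
    | some (bp, _) => if p < bp then some (p, c) else best

def pick_fecha_column_alt (cols : List String) : Option String :=
  (cols.foldl pvStep none).map (·.2)

-- ===== PRECONDITION & SPEC =====
def Spec_pick_fecha_column (cols : List String) (out : Option String) : Prop := out = pick_fecha_column_alt cols
instance (cols : List String) (out : Option String) : Decidable (Spec_pick_fecha_column cols out) := by unfold Spec_pick_fecha_column; infer_instance

-- ===== CLAIM (what is proved, stated in full; the proofs are below) =====
def Claim_equal_pick_fecha_column : Prop := ∀ (cols : List String), Dom_pick_fecha_column cols → Spec_pick_fecha_column cols (pick_fecha_column cols)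

-- ===== LEMMAS AND PROOFS =====

-- the three predicates on a raw column name
def pvQ1 (c : String) : Bool :=
  PySem.Str.isIn "fecha" (PySem.Str.lower c) &&
    (PySem.Str.isIn "val" (PySem.Str.lower c) || PySem.Str.isIn "valor" (PySem.Str.lower c))
def pvQ2 (c : String) : Bool :=
  PySem.Str.isIn "fecha" (PySem.Str.lower c) &&
    (PySem.Str.isIn "contab" (PySem.Str.lower c) || PySem.Str.isIn "contable" (PySem.Str.lower c))
def pvQ3 (c : String) : Bool := PySem.Str.isIn "fecha" (PySem.Str.lower c)

-- one insert step on the items-level find?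
theorem pv_find_insert (d : PySem.Dict String String)
    (hinv : ∀ kv ∈ d.items, kv.2 = PySem.Str.lower kv.1) (c : String) (q : String × String → Bool) :
    ((d.insert c (PySem.Str.lower c)).items.find? q)
      = (d.items.find? q).or (if q (c, PySem.Str.lower c) then some (c, PySem.Str.lower c) else none) := by
  by_cases h : d.contains c = true
  · rw [PySem.Dict.items_insert_of_contains _ _ h]
    have hmap : d.items.map (fun p => if p.1 == c then (c, PySem.Str.lower c) else p) = d.items := by
      apply List.map_congr_left ?_ |>.trans d.items.map_id
      intro p hp
      by_cases hpc : p.1 == c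
      · have : p.1 = c := by simpa using hpc
        simp [← this, ← hinv p hp]
      · simp [hpc]
    rw [hmap]
    cases hf : d.items.find? q with
    | some kv => simp [Option.or]
    | none =>
      have hc : c ∈ d.keys := (PySem.Dict.contains_iff_mem_keys d c).mp h
      have : ∃ v, (c, v) ∈ d.items := by
        simp only [PySem.Dict.keys, List.mem_map] at hc
        obtain ⟨p, hp, hpc⟩ := hc
        exact ⟨p.2, by simpa [← hpc] using hp⟩
      obtain ⟨v, hv⟩ := this
      have hq : q (c, PySem.Str.lower c) = false := by
        have := hinv _ hv
        have : (c, PySem.Str.lower c) ∈ d.items := by simpa [← this] using hv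
        simpa using List.find?_eq_none.mp hf _ this
      simp [hq]
  · rw [PySem.Dict.items_insert_of_not_contains _ _ (by simpa using h), List.find?_append]
    cases hq : q (c, PySem.Str.lower c) <;> simp [List.find?, hq]

-- find? over the dict's items equals find? over the columns (values are determined by the keys)
theorem pv_find_items (cols : List String) (d : PySem.Dict String String)
    (hinv : ∀ kv ∈ d.items, kv.2 = PySem.Str.lower kv.1) (q : String × String → Bool) :
    ((cols.foldl (fun d c => d.insert c (PySem.Str.lower c)) d).items.find? q)
      = (d.items.find? q).or
          ((cols.find? (fun c => q (c, PySem.Str.lower c))).map (fun c => (c, PySem.Str.lower c))) := by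
  induction cols generalizing d with
  | nil => simp
  | cons c cs ih =>
    have hinv' : ∀ kv ∈ (d.insert c (PySem.Str.lower c)).items, kv.2 = PySem.Str.lower kv.1 := by
      intro kv hkv
      rw [PySem.Dict.mem_items_insert] at hkv
      rcases hkv with h | ⟨h, _⟩
      · simp [h]
      · exact hinv kv h
    simp only [List.foldl_cons, List.find?_cons]
    rw [ih (d.insert c (PySem.Str.lower c)) hinv', pv_find_insert d hinv c q]
    cases hq : q (c, PySem.Str.lower c) <;> simp [hq, Option.or_assoc]

-- merge of two "best" candidates, left one earlier
def pvMerge : Option (Nat × String) → Option (Nat × String) → Option (Nat × String)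
  | none, r => r
  | some b, none => some b
  | some b, some r => if r.1 < b.1 then some r else some b

theorem pvMerge_assoc (a b c : Option (Nat × String)) :
    pvMerge (pvMerge a b) c = pvMerge a (pvMerge b c) := by
  rcases a with _ | ⟨p, x⟩
  · simp [pvMerge]
  · rcases b with _ | ⟨q, y⟩
    · rcases c with _ | ⟨r, z⟩ <;> simp [pvMerge]
    · rcases c with _ | ⟨r, z⟩
      · by_cases h1 : q < p <;> simp [pvMerge, h1]
      · by_cases h1 : q < p <;> by_cases h2 : r < q <;> by_cases h3 : r < p <;>
          simp [pvMerge, h1, h2, h3] <;> omega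

theorem pvStep_eq_merge (acc : Option (Nat × String)) (c : String) :
    pvStep acc c = pvMerge acc (pvStep none c) := by
  rcases acc with _ | ⟨bp, bc⟩ <;> simp only [pvStep] <;>
    rcases h : pvPrio (PySem.Str.lower c) with _ | p <;> simp [pvMerge]

theorem pv_foldl_merge (cols : List String) (acc : Option (Nat × String)) :
    cols.foldl pvStep acc = pvMerge acc (cols.foldl pvStep none) := by
  induction cols generalizing acc with
  | nil => cases acc <;> simp [pvMerge]
  | cons c cs ih =>
    simp only [List.foldl_cons]
    rw [ih (pvStep acc c), ih (pvStep none c), pvStep_eq_merge acc c, pvMerge_assoc]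

-- the single pass computes: first Q1 column at priority 1, else first Q2 at 2, else first Q3 at 3
theorem pv_best_char (cols : List String) :
    cols.foldl pvStep none
      = (match cols.find? pvQ1 with
         | some c => some (1, c)
         | none =>
           match cols.find? pvQ2 with
           | some c => some (2, c)
           | none =>
             match cols.find? pvQ3 with
             | some c => some (3, c)
             | none => none) := by
  induction cols with
  | nil => rfl
  | cons c cs ih =>
    rw [List.foldl_cons, pv_foldl_merge cs (pvStep none c), ih]
    by_cases h3 : PySem.Str.isIn "fecha" (PySem.Str.lower c) = true
    · by_cases hV : (PySem.Str.isIn "val" (PySem.Str.lower c) || PySem.Str.isIn "valor" (PySem.Str.lower c)) = true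
      · simp only [List.find?_cons, pvQ1, pvQ2, pvQ3, pvStep, pvPrio, h3, hV]
        cases h1 : cs.find? pvQ1 <;> cases h2 : cs.find? pvQ2 <;> cases hf3 : cs.find? pvQ3 <;>
          simp [pvMerge]
      · by_cases hC : (PySem.Str.isIn "contab" (PySem.Str.lower c) || PySem.Str.isIn "contable" (PySem.Str.lower c)) = true
        · simp only [List.find?_cons, pvQ1, pvQ2, pvQ3, pvStep, pvPrio, h3, hV, hC]
          cases h1 : cs.find? pvQ1 <;> cases h2 : cs.find? pvQ2 <;> cases hf3 : cs.find? pvQ3 <;>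
            simp [pvMerge]
        · simp only [List.find?_cons, pvQ1, pvQ2, pvQ3, pvStep, pvPrio, h3, hV, hC]
          cases h1 : cs.find? pvQ1 <;> cases h2 : cs.find? pvQ2 <;> cases hf3 : cs.find? pvQ3 <;>
            simp [pvMerge]
    · simp only [List.find?_cons, pvQ1, pvQ2, pvQ3, pvStep, pvPrio, h3]
      cases h1 : cs.find? pvQ1 <;> cases h2 : cs.find? pvQ2 <;> cases hf3 : cs.find? pvQ3 <;>
        simp [pvMerge]

-- ===== VERDICT (by name: the statement is the Claim_ definition above) =====
theorem pick_fecha_column_spec : Claim_equal_pick_fecha_column := by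
  intro cols _
  show pick_fecha_column cols = pick_fecha_column_alt cols
  have hempty : ∀ kv ∈ (PySem.Dict.empty : PySem.Dict String String).items, kv.2 = PySem.Str.lower kv.1 := by
    intro kv hkv
    simp [PySem.Dict.empty] at hkv
  simp only [pick_fecha_column, pick_fecha_column_alt]
  rw [pv_best_char,
      pv_find_items cols PySem.Dict.empty hempty,
      pv_find_items cols PySem.Dict.empty hempty,
      pv_find_items cols PySem.Dict.empty hempty]
  have e1 : (fun c => PySem.Str.isIn "fecha" (PySem.Str.lower c) &&
      (PySem.Str.isIn "val" (PySem.Str.lower c) || PySem.Str.isIn "valor" (PySem.Str.lower c))) = pvQ1 := rfl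
  have e2 : (fun c => PySem.Str.isIn "fecha" (PySem.Str.lower c) &&
      (PySem.Str.isIn "contab" (PySem.Str.lower c) || PySem.Str.isIn "contable" (PySem.Str.lower c))) = pvQ2 := rfl
  have e3 : (fun c => PySem.Str.isIn "fecha" (PySem.Str.lower c)) = pvQ3 := rfl
  simp only [PySem.Dict.empty, List.find?_nil, Option.none_or, e1, e2, e3]
  cases h1 : cols.find? pvQ1 <;> cases h2 : cols.find? pvQ2 <;> cases h3 : cols.find? pvQ3 <;> simp
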